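-- pv_equiv track=rewrite | github.com/Belco90/python-basic-exercises | exercises.py | draw_inverted_pyramid
-- ===== SOURCE A (Python) =====
-- def draw_inverted_pyramid(height):
--     """Generates a string with a inverted pyramid made of * symbols and `height` rows.
--
--     Examples:
--         >>> print draw_pyramid(1)
--         *
--
--         >>> print draw_pyramid(2)
--         ***
--          *
--
--         >>> print draw_pyramid(5)
--         *********
--          *******
--           *****
--            ***
--             *
--
--     :param height: Number of rows (height)
--     :return: String containing corresponding inverted pyramid
--     """
--     rows = []
--     for i in range(height):
--         index1 = i + 1
--         left_space = " " * (index1 - 1)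
--         number_of_symbols = ((height - i) * 2) - 1
--         pyramid_slice = "*" * number_of_symbols
--         new_row = left_space + pyramid_slice
--         rows.append(new_row)
--
--     return "\n".join(rows)
-- ===== SOURCE B (Python) =====
-- def draw_inverted_pyramid(height):
--     if height <= 0:
--         return ""
--     row = " " * (height - 1) + "*"
--     rows = [row]
--     for _ in range(height - 1):
--         row = row[1:] + "**"
--         rows.append(row)
--     rows.reverse()
--     return "\n".join(rows)
-- ===== Notes on version B (the rewrite author's own statement) =====
-- stated objective: alternative
-- what changed: Replaces A's loop that computes every row independently from its index by building the rows bottom-up, deriving each row from the previous one by dropping its first space and appending a star on each side, then reversing the list before joining.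
import Mathlib
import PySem

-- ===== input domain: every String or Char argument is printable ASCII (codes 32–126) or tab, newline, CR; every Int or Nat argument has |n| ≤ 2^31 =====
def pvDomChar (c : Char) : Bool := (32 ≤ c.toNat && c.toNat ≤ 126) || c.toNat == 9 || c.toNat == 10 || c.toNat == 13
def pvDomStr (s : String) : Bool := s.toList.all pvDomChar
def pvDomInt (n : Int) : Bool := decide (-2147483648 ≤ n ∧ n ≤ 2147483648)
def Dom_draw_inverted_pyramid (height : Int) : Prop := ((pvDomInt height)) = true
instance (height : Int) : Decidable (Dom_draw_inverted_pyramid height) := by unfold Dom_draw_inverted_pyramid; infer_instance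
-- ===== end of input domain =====

-- B replaces A's per-row index arithmetic by deriving each row from the previous one (drop the first space, append a star on each side), built bottom-up and reversed — an alternative decomposition, same cost.

-- ===== PORT A =====
-- A: build each row directly from its row index, then join with newlines.
def draw_inverted_pyramid (height : Int) : String :=
  let rows := (PySem.List.pyRange 0 height 1).foldl
    (fun rows i =>
      let index1 := i + 1
      let left_space := List.replicate (index1 - 1).toNat ' '
      let number_of_symbols := ((height - i) * 2) - 1
      let pyramid_slice := List.replicate number_of_symbols.toNat '*'
      let new_row := left_space ++ pyramid_slice
      rows ++ [new_row]) []
  String.ofList (PySem.Chars.join ['\n'] rows)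

-- ===== PORT B =====
-- B: start from the bottom row; each next row up drops the leading space and appends two stars; reverse, join.
def draw_inverted_pyramid_alt (height : Int) : String :=
  if height ≤ 0 then String.ofList []
  else
    let row0 := List.replicate (height - 1).toNat ' ' ++ ['*']
    let st := (PySem.List.pyRange 0 (height - 1) 1).foldl
      (fun (p : List Char × List (List Char)) (_ : Int) =>
        let row := PySem.List.slice p.1 (some 1) none ++ ['*', '*']
        (row, p.2 ++ [row]))
      (row0, [row0])
    String.ofList (PySem.Chars.join ['\n'] st.2.reverse)

-- ===== PRECONDITION & SPEC =====
def Spec_draw_inverted_pyramid (height : Int) (out : String) : Prop := out = draw_inverted_pyramid_alt height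
instance (height : Int) (out : String) : Decidable (Spec_draw_inverted_pyramid height out) := by unfold Spec_draw_inverted_pyramid; infer_instance

-- ===== CLAIM (what is proved, stated in full; the proofs are below) =====
def Claim_equal_draw_inverted_pyramid : Prop := ∀ (height : Int), Dom_draw_inverted_pyramid height → Spec_draw_inverted_pyramid height (draw_inverted_pyramid height)

-- ===== LEMMAS AND PROOFS =====

-- A's append-accumulating loop is a map over the range.
theorem pv_foldl_append_map {α β : Type} (f : α → β) (l : List α) (acc : List β) :
    l.foldl (fun r i => r ++ [f i]) acc = acc ++ l.map f := by
  induction l generalizing acc with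
  | nil => simp
  | cons x xs ih => simp [List.foldl, ih]

-- The row with k leading spaces in a pyramid of height h.
def pvRowA (h : Int) (k : Nat) : List Char :=
  List.replicate k ' ' ++ List.replicate ((h - k) * 2 - 1).toNat '*'

-- B's step takes the row with k+1 spaces to the row with k spaces.
theorem pv_step_row (h : Int) (k : Nat) (hk : (k : Int) + 1 ≤ h - 1) :
    PySem.List.slice (pvRowA h (k + 1)) (some 1) none ++ ['*', '*'] = pvRowA h k := by
  rw [PySem.List.slice_from_one]
  simp only [pvRowA, List.replicate_succ, List.cons_append, List.tail_cons]
  rw [List.append_assoc]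
  congr 1
  have h2 : ((h - (k : Int)) * 2 - 1).toNat = ((h - ((k : Nat) + 1 : Nat)) * 2 - 1).toNat + 2 := by
    push_cast
    omega
  rw [h2, List.replicate_add]
  rfl

-- Invariant of B's loop: after n steps the state is the (m-n)-spaces row and the bottom-up row list.
theorem pv_fold_inv (h : Int) (m : Nat) (hm : (m : Int) = h - 1) :
    ∀ n : Nat, n ≤ m →
    (List.range n).foldl
      (fun (p : List Char × List (List Char)) (_ : Nat) =>
        let row := PySem.List.slice p.1 (some 1) none ++ ['*', '*']
        (row, p.2 ++ [row]))
      (pvRowA h m, [pvRowA h m])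
    = (pvRowA h (m - n), (List.range (n + 1)).map (fun j => pvRowA h (m - j))) := by
  intro n
  induction n with
  | zero => intro _; simp [List.range_one]
  | succ n ih =>
    intro hn
    rw [List.range_succ, List.foldl_append, ih (by omega)]
    simp only [List.foldl_cons, List.foldl_nil]
    have hrow : PySem.List.slice (pvRowA h (m - n)) (some 1) none ++ ['*', '*']
        = pvRowA h (m - (n + 1)) := by
      have he : m - n = (m - (n + 1)) + 1 := by omega
      rw [he]
      exact pv_step_row h (m - (n + 1)) (by omega)
    rw [Prod.mk.injEq]
    refine ⟨hrow, ?_⟩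
    rw [List.range_succ (n := n + 1), List.map_append, List.map_cons, List.map_nil, hrow]

-- Reversing a back-to-front-indexed map over a range gives the forward map.
theorem pv_reverse_map_range {α : Type} (f : Nat → α) (n : Nat) :
    ((List.range n).map (fun j => f (n - 1 - j))).reverse = (List.range n).map f := by
  apply List.ext_getElem
  · simp
  intro i h1 h2
  simp only [List.getElem_reverse, List.getElem_map, List.getElem_range]
  simp only [List.length_map, List.length_range] at h1 h2 ⊢
  congr 1
  omega

theorem draw_inverted_pyramid_spec : Claim_equal_draw_inverted_pyramid := by
  intro height _
  unfold Spec_draw_inverted_pyramid draw_inverted_pyramid draw_inverted_pyramid_alt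
  by_cases hneg : height ≤ 0
  · rw [if_pos hneg]
    simp [PySem.List.pyRange_one_eq_nil hneg, PySem.Chars.join, List.intercalate]
  · rw [if_neg hneg]
    simp only [pv_foldl_append_map, List.nil_append]
    -- rewrite both ranges to List.range
    rw [PySem.List.pyRange_one, PySem.List.pyRange_one]
    simp only [Int.sub_zero, List.map_map, List.foldl_map]
    set m : Nat := (height - 1).toNat with hmdef
    have hm : (m : Int) = height - 1 := by omega
    have hrow0 : List.replicate (height - 1).toNat ' ' ++ ['*'] = pvRowA height m := by
      simp only [pvRowA, ← hmdef]
      congr 1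
      have : ((height - (m : Int)) * 2 - 1).toNat = 1 := by omega
      rw [this]
      rfl
    rw [hrow0]
    rw [pv_fold_inv height m hm m (le_refl m)]
    have hrev : ((List.range (m + 1)).map (fun j => pvRowA height (m - j))).reverse
        = (List.range (m + 1)).map (pvRowA height) := by
      have := pv_reverse_map_range (pvRowA height) (m + 1)
      simpa using this
    simp only [hrev]
    have hmt : height.toNat = m + 1 := by omega
    rw [hmt]
    apply congrArg
    apply congrArg
    apply List.map_congr_left
    intro k _
    simp only [Function.comp_apply, pvRowA]
    congr 1
    · congr 1
      omega
    · congr 2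
      omega
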